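-- pv_equiv track=rewrite | github.com/pazag/advent-of-code-2023 | day-9/main.py | _get_history_top_value
-- ===== SOURCE A (Python) =====
-- def _get_history_top_value(history_sequences : list[list[int]],
--                            is_part_2: bool):
--     '''
--     Complete the history sequences starting from the bottom. Return the last value
--     of the first sequence (False) or the first value of the first sequence (True)
--     depending on the value of the parameter "is_part_2".
--     '''
--     history_sequences[-1].append(0)
--     nb_histories = len(history_sequences)
--     for i in range(1, len(history_sequences)):
--         top_story    = history_sequences[nb_histories - i - 1]
--         bottom_story = history_sequences[nb_histories - i]
--         if is_part_2:
--             top_story.insert(0, top_story[0] - bottom_story[0])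
--         else:
--             top_story.append(top_story[-1] + bottom_story[-1])
--
--     return history_sequences[0][0] if is_part_2 else history_sequences[0][-1]
-- ===== SOURCE B (Python) =====
-- def _get_history_top_value(history_sequences : list[list[int]],
--                            is_part_2: bool):
--     '''
--     Closed form: the completed first sequence's edge value is the plain sum
--     (part 1) / alternating sum (part 2) of the sequences' edge elements, with a
--     0 seeded onto the last sequence.  One pass; the argument is NOT mutated
--     (unlike the original, which completes every sequence in place).
--     '''
--     rows = history_sequences[:-1] + [history_sequences[-1] + [0]]
--     if is_part_2:
--         return sum(r[0] if i % 2 == 0 else -r[0] for i, r in enumerate(rows))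
--     return sum(r[-1] for r in rows)
-- ===== Notes on version B (the rewrite author's own statement) =====
-- stated objective: simpler
-- what changed: Replaces the in-place bottom-up completion of every sequence by a closed form: the answer is the plain sum (part 1) / alternating sum (part 2) of the rows' edge elements after seeding a 0 on the last row; B is a two-line single pass and does not mutate the argument.
import Mathlib
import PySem

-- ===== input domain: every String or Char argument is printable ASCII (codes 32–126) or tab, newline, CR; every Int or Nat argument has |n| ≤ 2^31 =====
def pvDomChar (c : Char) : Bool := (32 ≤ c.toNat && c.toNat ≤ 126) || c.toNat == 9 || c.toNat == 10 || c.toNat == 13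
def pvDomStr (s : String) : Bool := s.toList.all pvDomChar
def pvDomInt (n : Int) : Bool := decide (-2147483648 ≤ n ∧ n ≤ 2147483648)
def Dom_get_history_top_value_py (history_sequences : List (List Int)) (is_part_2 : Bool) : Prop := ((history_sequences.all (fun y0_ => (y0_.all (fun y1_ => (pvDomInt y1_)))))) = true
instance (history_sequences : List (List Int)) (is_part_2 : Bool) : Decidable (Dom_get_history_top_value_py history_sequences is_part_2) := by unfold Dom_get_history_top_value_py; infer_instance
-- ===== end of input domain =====

-- B computes the answer as a closed-form one-pass (alternating) sum of the rows' edge elements instead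
-- of completing every sequence in place from the bottom; equivalence is about the RETURN value only
-- (A mutates its argument, B does not).

-- ===== PORT A =====
-- one iteration of A's for-loop: mutate row nb-i-1 from row nb-i
def pvStepA (is_part_2 : Bool) (nb : Int) (st : List (List Int)) (i : Int) : List (List Int) :=
  let top := PySem.List.pyGetD st (nb - i - 1) []
  let bottom := PySem.List.pyGetD st (nb - i) []
  if is_part_2 then
    PySem.List.pySetD st (nb - i - 1) ((PySem.List.pyGetD top 0 0 - PySem.List.pyGetD bottom 0 0) :: top)
  else
    PySem.List.pySetD st (nb - i - 1) (top ++ [PySem.List.pyGetD top (-1) 0 + PySem.List.pyGetD bottom (-1) 0])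

def get_history_top_value_py (history_sequences : List (List Int)) (is_part_2 : Bool) : Int :=
  -- history_sequences[-1].append(0)
  let st0 := PySem.List.pySetD history_sequences (-1)
      (PySem.List.pyGetD history_sequences (-1) [] ++ [0])
  let nb : Int := PySem.List.len st0
  -- for i in range(1, len(history_sequences)): ...
  let fin := (PySem.List.pyRange 1 nb 1).foldl (pvStepA is_part_2 nb) st0
  if is_part_2 then PySem.List.pyGetD (PySem.List.pyGetD fin 0 []) 0 0
  else PySem.List.pyGetD (PySem.List.pyGetD fin 0 []) (-1) 0

-- ===== PORT B =====
def get_history_top_value_py_alt (history_sequences : List (List Int)) (is_part_2 : Bool) : Int :=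
  -- rows = history_sequences[:-1] + [history_sequences[-1] + [0]]
  let rows := PySem.List.slice history_sequences none (some (-1)) ++
      [PySem.List.pyGetD history_sequences (-1) [] ++ [0]]
  if is_part_2 then
    -- sum(r[0] if i % 2 == 0 else -r[0] for i, r in enumerate(rows))
    (PySem.List.enumerate rows 0).foldl
      (fun acc p => acc + (if PySem.Int.mod p.1 2 == 0 then PySem.List.pyGetD p.2 0 0
                           else -PySem.List.pyGetD p.2 0 0)) 0
  else
    -- sum(r[-1] for r in rows)
    rows.foldl (fun acc r => acc + PySem.List.pyGetD r (-1) 0) 0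

-- ===== PRECONDITION & SPEC =====
-- Pre_ excludes exactly the inputs where the Python A raises IndexError: an empty outer list, or an
-- empty sequence anywhere but in last position.
def Pre_get_history_top_value_py (history_sequences : List (List Int)) (is_part_2 : Bool) : Prop :=
  history_sequences ≠ [] ∧ ∀ r ∈ history_sequences.dropLast, r ≠ []
instance (history_sequences : List (List Int)) (is_part_2 : Bool) : Decidable (Pre_get_history_top_value_py history_sequences is_part_2) := by unfold Pre_get_history_top_value_py; infer_instance
def pvWitness_get_history_top_value_py : List (List Int) × Bool := ([[0, 3, 6], [3, 3], [0]], false)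

def Spec_get_history_top_value_py (history_sequences : List (List Int)) (is_part_2 : Bool) (out : Int) : Prop := out = get_history_top_value_py_alt history_sequences is_part_2
instance (history_sequences : List (List Int)) (is_part_2 : Bool) (out : Int) : Decidable (Spec_get_history_top_value_py history_sequences is_part_2 out) := by unfold Spec_get_history_top_value_py; infer_instance

-- ===== CLAIM (what is proved, stated in full; the proofs are below) =====
def Claim_equal_get_history_top_value_py : Prop := ∀ (history_sequences : List (List Int)) (is_part_2 : Bool), Dom_get_history_top_value_py history_sequences is_part_2 → Pre_get_history_top_value_py history_sequences is_part_2 → Spec_get_history_top_value_py history_sequences is_part_2 (get_history_top_value_py history_sequences is_part_2)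

-- ===== LEMMAS AND PROOFS =====

-- edge element read by A's loop (first element for part 2, last for part 1), totalised with default 0
def pvEdge (p2 : Bool) (r : List Int) : Int := if p2 then r.getD 0 0 else r.getLastD 0
-- how A's loop combines the top row's edge with the (already final) bottom row's edge
def pvComb (p2 : Bool) (a b : Int) : Int := if p2 then a - b else a + b

lemma pvGetD_neg_one_getLastD (r : List Int) : PySem.List.pyGetD r (-1) 0 = r.getLastD 0 := by
  cases r with
  | nil => decide
  | cons x xs =>
    rw [PySem.List.pyGetD_neg_one (x::xs) 0 (by simp), List.getLast_eq_getLastD]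
    cases xs with
    | nil => simp
    | cons y ys =>
      have hz : ∃ z, (y :: ys).getLast? = some z := by
        simpa [Option.isSome_iff_exists] using (List.getLast?_isSome (l := y :: ys)).mpr (by simp)
      obtain ⟨z, hz⟩ := hz
      simp [List.getLastD_eq_getLast?, hz]

lemma pvSetD_neg_one (hs : List (List Int)) (v : List Int) (h : hs ≠ []) :
    PySem.List.pySetD hs (-1) v = hs.set (hs.length - 1) v := by
  have hl : 1 ≤ hs.length := List.length_pos_iff.mpr h
  simp [PySem.List.pySetD, PySem.List.pySet?, PySem.List.pyIdx?,
    show -(hs.length:Int) ≤ -1 by omega]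

-- A's loop characterised: the edge of the final first row is the right fold of pvComb over the edges
-- of the untouched prefix, seeded with the edge of the first already-final row.
lemma pvLoopA (p2 : Bool) (n : Nat) : ∀ (k m : Nat) (st : List (List Int)),
    m + k = n → st.length = n → 1 ≤ m →
    pvEdge p2 (((PySem.List.pyRange (m : Int) (n : Int) 1).foldl (pvStepA p2 (n : Int)) st).getD 0 [])
      = (st.take k).foldr (fun r acc => pvComb p2 (pvEdge p2 r) acc) (pvEdge p2 (st.getD k [])) := by
  intro k
  induction k with
  | zero =>
    intro m st hmk hlen hm
    rw [PySem.List.pyRange_one_eq_nil (by omega)]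
    simp
  | succ k ih =>
    intro m st hmk hlen hm
    rw [PySem.List.pyRange_one_cons (by exact_mod_cast (by omega : m < n))]
    have hcast : ((m : Int) + 1) = ((m + 1 : Nat) : Int) := by push_cast; ring
    rw [List.foldl_cons, hcast]
    -- rewrite the step
    have hidx1 : (n : Int) - (m : Int) - 1 = ((k : Nat) : Int) := by omega
    have hidx2 : (n : Int) - (m : Int) = (((k + 1 : Nat)) : Int) := by push_cast; omega
    have hstep : pvStepA p2 (n : Int) st (m : Int)
        = st.set k (if p2 then
            ((st.getD k []).getD 0 0 - (st.getD (k+1) []).getD 0 0) :: st.getD k []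
          else
            st.getD k [] ++ [(st.getD k []).getLastD 0 + (st.getD (k+1) []).getLastD 0]) := by
      simp only [pvStepA]
      rw [hidx1, hidx2]
      simp only [PySem.List.pyGetD_natCast, PySem.List.pySetD_natCast,
        pvGetD_neg_one_getLastD, PySem.List.pyGetD_zero]
      cases p2 <;> simp
    rw [hstep]
    set newrow := (if p2 then
            ((st.getD k []).getD 0 0 - (st.getD (k+1) []).getD 0 0) :: st.getD k []
          else
            st.getD k [] ++ [(st.getD k []).getLastD 0 + (st.getD (k+1) []).getLastD 0]) with hnew
    have hk : k < n := by omega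
    have hlen' : (st.set k newrow).length = n := by simp [hlen]
    rw [ih (m+1) _ (by omega) hlen' (by omega)]
    -- prefix untouched
    have htake : (st.set k newrow).take k = st.take k := by
      rw [List.take_set]
      exact List.set_eq_of_length_le (by simp)
    have hgetk : (st.set k newrow).getD k [] = newrow := by
      simp [List.getD, List.getElem?_set_self (by omega : k < st.length)]
    rw [htake, hgetk]
    -- peel the last element of the (k+1)-prefix on the RHS
    have hsome : st[k]? = some (st.getD k []) := by
      rw [List.getElem?_eq_getElem (by omega)]
      simp [List.getD, List.getElem?_eq_getElem (by omega : k < st.length)]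
    rw [List.take_add_one, hsome]
    simp only [Option.toList_some, List.foldr_append, List.foldr_cons, List.foldr_nil]
    -- edges combine
    congr 1
    cases p2 <;> simp [pvEdge, pvComb, hnew]

-- alternating sum with running sign s
def pvAlt (l : List (List Int)) (s : Int) : Int :=
  match l with
  | [] => 0
  | r :: rs => s * r.getD 0 0 + pvAlt rs (-s)

lemma pvAlt_neg (l : List (List Int)) (s : Int) : pvAlt l (-s) = -pvAlt l s := by
  induction l generalizing s with
  | nil => simp [pvAlt]
  | cons r rs ih => simp [pvAlt, ih]; ring

lemma pvAlt_append_singleton (l : List (List Int)) (r : List Int) (s : Int) :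
    pvAlt (l ++ [r]) s = pvAlt l s + (if l.length % 2 = 0 then s else -s) * r.getD 0 0 := by
  induction l generalizing s with
  | nil => simp [pvAlt]
  | cons x xs ih =>
    simp only [List.cons_append, pvAlt, ih, List.length_cons]
    rcases Nat.even_or_odd xs.length with h | h
    · have h0 : xs.length % 2 = 0 := Nat.even_iff.mp h
      have h1 : (xs.length + 1) % 2 = 1 := by omega
      simp [h0, h1]; ring
    · have h0 : xs.length % 2 = 1 := Nat.odd_iff.mp h
      have h1 : (xs.length + 1) % 2 = 0 := by omega
      simp [h0, h1]; ring

lemma pvFoldrSub (l : List (List Int)) (b : Int) :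
    l.foldr (fun r acc => pvComb true (pvEdge true r) acc) b
      = pvAlt l 1 + (if l.length % 2 = 0 then b else -b) := by
  induction l with
  | nil => simp [pvAlt]
  | cons x xs ih =>
    rw [List.foldr_cons, ih]
    simp only [pvAlt, pvComb, pvEdge, List.length_cons, if_true]
    have : pvAlt xs (-1 : Int) = -pvAlt xs 1 := pvAlt_neg xs 1
    rcases Nat.even_or_odd xs.length with h | h
    · have h0 : xs.length % 2 = 0 := Nat.even_iff.mp h
      have h1 : (xs.length + 1) % 2 = 1 := by omega
      simp [h0, h1, this]; ring
    · have h0 : xs.length % 2 = 1 := Nat.odd_iff.mp h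
      have h1 : (xs.length + 1) % 2 = 0 := by omega
      simp [h0, h1, this]; ring

lemma pvFoldrAdd (l : List (List Int)) (b : Int) :
    l.foldr (fun r acc => pvComb false (pvEdge false r) acc) b
      = (l.map (fun r => r.getLastD 0)).sum + b := by
  induction l with
  | nil => simp
  | cons x xs ih =>
    rw [List.foldr_cons, ih]
    simp [pvComb, pvEdge]; ring

lemma pvEnumFoldl (l : List (List Int)) (s c : Int) :
    (PySem.List.enumerate l s).foldl
      (fun acc p => acc + (if PySem.Int.mod p.1 2 == 0 then PySem.List.pyGetD p.2 0 0
                           else -PySem.List.pyGetD p.2 0 0)) c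
      = c + pvAlt l (if PySem.Int.mod s 2 == 0 then 1 else -1) := by
  induction l generalizing s c with
  | nil => simp [PySem.List.enumerate_nil, pvAlt]
  | cons r rs ih =>
    rw [PySem.List.enumerate_cons, List.foldl_cons, ih]
    rw [PySem.Int.mod_eq_emod_of_pos (a := s) (by norm_num),
      PySem.Int.mod_eq_emod_of_pos (a := s + 1) (by norm_num)]
    simp only [PySem.List.pyGetD_zero, pvAlt]
    by_cases h : s % 2 = 0
    · have h1 : (s + 1) % 2 = 1 := by omega
      simp [h, h1]; ring
    · have h0 : s % 2 = 1 := by omega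
      have h1 : (s + 1) % 2 = 0 := by omega
      simp [h0, h1]; ring

-- ===== VERDICT (by name: the statement is the Claim_ definition above) =====
theorem get_history_top_value_py_spec : Claim_equal_get_history_top_value_py := by
  intro hs p2 _ hpre
  obtain ⟨hne, -⟩ := hpre
  unfold Spec_get_history_top_value_py
  have hn : 1 ≤ hs.length := List.length_pos_iff.mpr hne
  have hlast : PySem.List.pyGetD hs (-1) [] = hs.getLast hne :=
    PySem.List.pyGetD_neg_one hs [] hne
  have hst0 : PySem.List.pySetD hs (-1) (PySem.List.pyGetD hs (-1) [] ++ [0])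
      = hs.set (hs.length - 1) (hs.getLast hne ++ [0]) := by
    rw [hlast, pvSetD_neg_one hs _ hne]
  set st0 := hs.set (hs.length - 1) (hs.getLast hne ++ [0]) with hst0def
  have hlen0 : st0.length = hs.length := by simp [hst0def]
  have hloop := pvLoopA p2 hs.length (hs.length - 1) 1 st0 (by omega) hlen0 (le_refl 1)
  have htake : st0.take (hs.length - 1) = hs.dropLast := by
    rw [hst0def, List.take_set, List.set_eq_of_length_le (by simp), List.dropLast_eq_take]
  have hget : st0.getD (hs.length - 1) [] = hs.getLast hne ++ [0] := by
    simp [hst0def, List.getD, List.getElem?_set_self (by omega : hs.length - 1 < hs.length)]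
  rw [htake, hget] at hloop
  -- A's return value is the edge of the final first row
  have hA : get_history_top_value_py hs p2
      = pvEdge p2 (((PySem.List.pyRange 1 (hs.length : Int) 1).foldl
          (pvStepA p2 (hs.length : Int)) st0).getD 0 []) := by
    simp only [get_history_top_value_py, hst0, PySem.List.len_eq, hlen0]
    cases p2 <;>
      try simp [pvEdge, PySem.List.pyGetD_zero, pvGetD_neg_one_getLastD]
  have hone : ((1 : Nat) : Int) = (1 : Int) := by norm_num
  rw [hone] at hloop
  rw [hA, hloop]
  -- B's value
  simp only [get_history_top_value_py_alt, PySem.List.slice_to_neg_one, hlast]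
  cases p2 with
  | false =>
    rw [pvFoldrAdd]
    simp only [Bool.false_eq_true, if_false]
    simp only [pvGetD_neg_one_getLastD]
    simp only [PySem.List.foldl_add]
    simp [pvEdge]
  | true =>
    rw [pvFoldrSub]
    simp only [if_true]
    rw [pvEnumFoldl]
    have h0 : (PySem.Int.mod 0 2 == 0) = true := by decide
    rw [h0]
    simp only [if_true]
    rw [pvAlt_append_singleton]
    have hlen' : hs.dropLast.length = hs.length - 1 := by simp
    rw [hlen']
    split_ifs <;> simp [pvEdge]
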